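-- pv_equiv track=rewrite | github.com/DiamondsH/GCLP | train.py | get_data_splits
-- ===== SOURCE A (Python) =====
-- def get_data_splits(label_list, event_list, sel_events, unsel_events):
--     event_map = {}
--     for i, (lbl, ev) in enumerate(zip(label_list, event_list)):
--         event_map.setdefault(ev, [[], []])
--         event_map[ev][0 if lbl == 1 else 1].append(i)
--     sr, sf, ur, uf = [], [], [], []
--     for ev in sel_events:
--         sr.extend(event_map.get(ev, [[], []])[0])
--         sf.extend(event_map.get(ev, [[], []])[1])
--     for ev in unsel_events:
--         ur.extend(event_map.get(ev, [[], []])[0])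
--         uf.extend(event_map.get(ev, [[], []])[1])
--     return sr, sf, ur, uf
-- ===== SOURCE B (Python) =====
-- def get_data_splits(label_list, event_list, sel_events, unsel_events):
--     pairs = list(enumerate(zip(label_list, event_list)))
--
--     def pick(ev, want_real):
--         return [i for i, (lbl, e) in pairs
--                 if e == ev and (lbl == 1) == want_real]
--
--     sr = [i for ev in sel_events for i in pick(ev, True)]
--     sf = [i for ev in sel_events for i in pick(ev, False)]
--     ur = [i for ev in unsel_events for i in pick(ev, True)]
--     uf = [i for ev in unsel_events for i in pick(ev, False)]
--     return sr, sf, ur, uf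
-- ===== Notes on version B (the rewrite author's own statement) =====
-- stated objective: simpler
-- what changed: B builds no dictionary index at all: for each queried event it re-scans the enumerated (label,event) pairs with a filter, selecting indices whose event matches and whose label class (==1 or !=1) matches, trading A's one-pass dict of pre-partitioned index pairs for direct per-query scans.
import Mathlib
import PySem

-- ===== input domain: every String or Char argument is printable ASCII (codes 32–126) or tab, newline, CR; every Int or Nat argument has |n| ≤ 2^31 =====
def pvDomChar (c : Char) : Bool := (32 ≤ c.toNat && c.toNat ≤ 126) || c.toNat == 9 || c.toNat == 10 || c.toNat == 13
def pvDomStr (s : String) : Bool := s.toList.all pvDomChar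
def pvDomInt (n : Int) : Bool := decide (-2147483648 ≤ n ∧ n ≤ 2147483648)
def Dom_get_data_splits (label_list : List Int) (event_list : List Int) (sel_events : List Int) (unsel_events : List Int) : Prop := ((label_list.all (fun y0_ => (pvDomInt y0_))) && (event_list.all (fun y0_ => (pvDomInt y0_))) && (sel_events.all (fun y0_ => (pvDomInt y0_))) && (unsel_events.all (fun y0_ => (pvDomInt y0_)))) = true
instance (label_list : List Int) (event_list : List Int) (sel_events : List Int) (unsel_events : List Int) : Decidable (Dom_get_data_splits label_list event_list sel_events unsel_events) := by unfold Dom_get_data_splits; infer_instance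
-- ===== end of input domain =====

-- B builds no dictionary index: it re-scans the enumerated (label,event) pairs with a
-- filter for each queried event and label class (objective: simpler, index-free; not faster).

-- ===== PORT A =====
def get_data_splits (label_list : List Int) (event_list : List Int) (sel_events : List Int) (unsel_events : List Int) : List Int × List Int × List Int × List Int :=
  -- event_map.setdefault(ev, [[], []]); event_map[ev][0 if lbl == 1 else 1].append(i)
  -- ported as Dict.modify (d[k] = f(d.get(k, dflt)))
  let event_map : PySem.Dict Int (List Int × List Int) :=
    (PySem.List.enumerate (label_list.zip event_list)).foldl
      (fun d p => d.modify p.2.2 ([], [])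
        (fun q => if p.2.1 = 1 then (q.1 ++ [p.1], q.2) else (q.1, q.2 ++ [p.1])))
      PySem.Dict.empty
  let s := sel_events.foldl
    (fun a ev => (a.1 ++ (event_map.getD ev ([], [])).1, a.2 ++ (event_map.getD ev ([], [])).2))
    ([], [])
  let u := unsel_events.foldl
    (fun a ev => (a.1 ++ (event_map.getD ev ([], [])).1, a.2 ++ (event_map.getD ev ([], [])).2))
    ([], [])
  (s.1, s.2, u.1, u.2)

-- ===== PORT B =====
-- the comprehension [i for i, (lbl, e) in pairs if e == ev and (lbl == 1) == want_real]
def pvPick (pairs : List (Int × Int × Int)) (ev : Int) (wantReal : Bool) : List Int :=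
  pairs.filterMap (fun p => if p.2.2 = ev ∧ (decide (p.2.1 = 1)) = wantReal then some p.1 else none)

def get_data_splits_alt (label_list : List Int) (event_list : List Int) (sel_events : List Int) (unsel_events : List Int) : List Int × List Int × List Int × List Int :=
  let pairs := PySem.List.enumerate (label_list.zip event_list)
  let sr := sel_events.flatMap (fun ev => pvPick pairs ev true)
  let sf := sel_events.flatMap (fun ev => pvPick pairs ev false)
  let ur := unsel_events.flatMap (fun ev => pvPick pairs ev true)
  let uf := unsel_events.flatMap (fun ev => pvPick pairs ev false)
  (sr, sf, ur, uf)

-- ===== PRECONDITION & SPEC =====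
def Spec_get_data_splits (label_list : List Int) (event_list : List Int) (sel_events : List Int) (unsel_events : List Int) (out : List Int × List Int × List Int × List Int) : Prop := out = get_data_splits_alt label_list event_list sel_events unsel_events
instance (label_list : List Int) (event_list : List Int) (sel_events : List Int) (unsel_events : List Int) (out : List Int × List Int × List Int × List Int) : Decidable (Spec_get_data_splits label_list event_list sel_events unsel_events out) := by unfold Spec_get_data_splits; infer_instance

-- ===== CLAIM (what is proved, stated in full; the proofs are below) =====
def Claim_equal_get_data_splits : Prop := ∀ (label_list : List Int) (event_list : List Int) (sel_events : List Int) (unsel_events : List Int), Dom_get_data_splits label_list event_list sel_events unsel_events → Spec_get_data_splits label_list event_list sel_events unsel_events (get_data_splits label_list event_list sel_events unsel_events)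

-- ===== LEMMAS AND PROOFS =====

-- A's per-event [reals, fakes] pair in the dict equals the pair of direct filter scans.
lemma pvDict_eq_pick (pairs : List (Int × Int × Int))
    (d : PySem.Dict Int (List Int × List Int))
    (ev : Int) :
    ((pairs.foldl (fun d p => d.modify p.2.2 ([], [])
        (fun q => if p.2.1 = 1 then (q.1 ++ [p.1], q.2) else (q.1, q.2 ++ [p.1]))) d).getD ev ([], []))
      = ((d.getD ev ([], [])).1 ++ pvPick pairs ev true,
         (d.getD ev ([], [])).2 ++ pvPick pairs ev false) := by
  induction pairs generalizing d with
  | nil => simp [pvPick]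
  | cons p rest ih =>
    simp only [List.foldl_cons, ih]
    rcases eq_or_ne ev p.2.2 with hev | hev
    · subst hev
      by_cases hl : p.2.1 = 1 <;> simp [pvPick, hl, PySem.Dict.getD_modify]
    · by_cases hl : p.2.1 = 1 <;> simp [pvPick, hl, hev, hev.symm, PySem.Dict.getD_modify]

lemma pvFoldl_pick (pairs : List (Int × Int × Int)) (evs : List Int) (acc : List Int × List Int) :
    evs.foldl (fun a ev => (a.1 ++ pvPick pairs ev true, a.2 ++ pvPick pairs ev false)) acc
      = (acc.1 ++ evs.flatMap (fun ev => pvPick pairs ev true),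
         acc.2 ++ evs.flatMap (fun ev => pvPick pairs ev false)) := by
  induction evs generalizing acc with
  | nil => simp
  | cons e rest ih => simp [ih, List.flatMap_cons]

-- ===== VERDICT (by name: the statement is the Claim_ definition above) =====
theorem get_data_splits_spec : Claim_equal_get_data_splits := by
  intro label_list event_list sel_events unsel_events _
  unfold Spec_get_data_splits get_data_splits get_data_splits_alt
  simp only [pvDict_eq_pick, PySem.Dict.getD_empty, List.nil_append, pvFoldl_pick]
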